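-- pv_equiv track=rewrite | github.com/asleworks/workroom-harness | .workroom/scripts/run_phases.py | extract_phase_summary
-- ===== SOURCE A (Python) =====
-- def extract_phase_summary(output: str, fallback: str) -> str:
--     for line in reversed(output.splitlines()):
--         line = line.strip()
--         if line.startswith("PHASE_SUMMARY:"):
--             summary = line.removeprefix("PHASE_SUMMARY:").strip()
--             if summary:
--                 return summary[:500]
--     return fallback
-- ===== SOURCE B (Python) =====
-- def extract_phase_summary(output: str, fallback: str) -> str:
--     result = None
--     for line in output.splitlines():
--         s = line.strip()
--         if s.startswith("PHASE_SUMMARY:"):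
--             rest = s.removeprefix("PHASE_SUMMARY:").strip()
--             if rest:
--                 result = rest
--     return result[:500] if result is not None else fallback
-- ===== Notes on version B (the rewrite author's own statement) =====
-- stated objective: alternative
-- what changed: Replaces A's reverse scan with early exit by a single forward pass keeping a last-writer-wins accumulator, truncating only at the end.
import Mathlib
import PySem

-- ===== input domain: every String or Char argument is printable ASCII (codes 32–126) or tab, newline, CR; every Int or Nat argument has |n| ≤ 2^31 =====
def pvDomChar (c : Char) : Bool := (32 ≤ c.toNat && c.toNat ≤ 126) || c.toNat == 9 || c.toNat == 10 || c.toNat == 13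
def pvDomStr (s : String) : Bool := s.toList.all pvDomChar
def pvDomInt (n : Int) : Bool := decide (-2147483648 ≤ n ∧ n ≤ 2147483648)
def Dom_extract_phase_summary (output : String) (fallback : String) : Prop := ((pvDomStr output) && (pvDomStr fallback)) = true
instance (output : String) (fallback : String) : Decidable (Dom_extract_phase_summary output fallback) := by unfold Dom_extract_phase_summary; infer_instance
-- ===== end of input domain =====

-- B replaces A's reverse scan with early return by a forward last-writer-wins accumulator pass (alternative decomposition, same cost).

-- str.removeprefix (not in PySem): exact — Python returns s[len(p):] if s startswith p else s
def pyRemoveprefix (s p : String) : String :=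
  if PySem.Str.startswith s p then String.ofList (s.toList.drop p.toList.length) else s

-- ===== PORT A =====
-- the 'for line in reversed(...)' loop with early return, as structural recursion over the reversed line list
def goA : List String → String → String
  | [], fallback => fallback
  | l :: rest, fallback =>
    let line := PySem.Str.strip l
    if PySem.Str.startswith line "PHASE_SUMMARY:" then
      let summary := PySem.Str.strip (pyRemoveprefix line "PHASE_SUMMARY:")
      if summary ≠ "" then PySem.Str.slice summary none (some 500)
      else goA rest fallback
    else goA rest fallback

def extract_phase_summary (output : String) (fallback : String) : String :=
  goA (PySem.Str.splitlines output).reverse fallback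

-- ===== PORT B =====
-- one forward pass updating an Option accumulator
def stepB (acc : Option String) (line : String) : Option String :=
  let s := PySem.Str.strip line
  if PySem.Str.startswith s "PHASE_SUMMARY:" then
    let rest := PySem.Str.strip (pyRemoveprefix s "PHASE_SUMMARY:")
    if rest ≠ "" then some rest else acc
  else acc

def extract_phase_summary_alt (output : String) (fallback : String) : String :=
  match (PySem.Str.splitlines output).foldl stepB none with
  | some r => PySem.Str.slice r none (some 500)
  | none => fallback

-- ===== PRECONDITION & SPEC =====
def Spec_extract_phase_summary (output : String) (fallback : String) (out : String) : Prop := out = extract_phase_summary_alt output fallback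
instance (output : String) (fallback : String) (out : String) : Decidable (Spec_extract_phase_summary output fallback out) := by unfold Spec_extract_phase_summary; infer_instance

-- ===== CLAIM (what is proved, stated in full; the proofs are below) =====
def Claim_equal_extract_phase_summary : Prop := ∀ (output : String) (fallback : String), Dom_extract_phase_summary output fallback → Spec_extract_phase_summary output fallback (extract_phase_summary output fallback)

-- ===== LEMMAS AND PROOFS =====

-- render an accumulator the way B's final match does
def renderB (acc : Option String) (fallback : String) : String :=
  match acc with
  | some r => PySem.Str.slice r none (some 500)
  | none => fallback

theorem goA_append (a b : List String) (fb : String) :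
    goA (a ++ b) fb = goA a (goA b fb) := by
  induction a with
  | nil => rfl
  | cons x t ih => simp only [List.cons_append, goA]; split_ifs <;> simp [ih]

theorem renderB_step (acc : Option String) (x fb : String) :
    renderB (stepB acc x) fb = goA [x] (renderB acc fb) := by
  simp only [stepB, goA, renderB]
  split_ifs <;> rfl

theorem goA_reverse_eq (l : List String) (acc : Option String) (fb : String) :
    renderB (l.foldl stepB acc) fb = goA l.reverse (renderB acc fb) := by
  induction l generalizing acc with
  | nil => rfl
  | cons x t ih =>
      simp only [List.foldl_cons, List.reverse_cons, goA_append, ih]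
      rw [renderB_step]

-- ===== VERDICT (by name: the statement is the Claim_ definition above) =====
theorem extract_phase_summary_spec : Claim_equal_extract_phase_summary := by
  intro output fallback _
  show extract_phase_summary output fallback = extract_phase_summary_alt output fallback
  have h := goA_reverse_eq (PySem.Str.splitlines output) none fallback
  simpa [extract_phase_summary, extract_phase_summary_alt, renderB] using h.symm
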